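-- pv_equiv track=rewrite | github.com/ayukyo/alltoolkit | Python/soundex_utils/mod.py | get_phonetic_variants
-- ===== SOURCE A (Python) =====
-- from typing import Optional, List, Tuple, Dict, Set
--
-- def get_phonetic_variants(code: str) -> List[str]:
--     """
--     获取给定编码可能的语音变体字母组合
--
--     Args:
--         code: SOUNDEX 编码
--
--     Returns:
--         可能的字母组合列表
--     """
--     reverse_mapping = {
--         '1': ['B', 'F', 'P', 'V'],
--         '2': ['C', 'G', 'J', 'K', 'Q', 'S', 'X', 'Z'],
--         '3': ['D', 'T'],
--         '4': ['L'],
--         '5': ['M', 'N'],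
--         '6': ['R'],
--         '0': [''],
--     }
--
--     if not code or len(code) < 1:
--         return []
--
--     variants = [[code[0]]]  # 首字母保持不变
--
--     for digit in code[1:]:
--         if digit in reverse_mapping:
--             variants.append(reverse_mapping[digit])
--         else:
--             variants.append([''])
--
--     # 生成所有组合（限制数量以避免爆炸）
--     result = ['']
--     for letters in variants:
--         new_result = []
--         for prefix in result:
--             for letter in letters:
--                 new_result.append(prefix + letter)
--                 if len(new_result) > 1000:  # 限制数量
--                     break
--             if len(new_result) > 1000:
--                 break
--         result = new_result
--
--     return result[:100]
-- ===== SOURCE B (Python) =====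
-- from typing import List
--
-- def get_phonetic_variants(code: str) -> List[str]:
--     """Mixed-radix enumeration: decode only the first (up to) 100 combinations
--     directly from their index instead of materialising the capped product."""
--     reverse_mapping = {
--         '1': ['B', 'F', 'P', 'V'],
--         '2': ['C', 'G', 'J', 'K', 'Q', 'S', 'X', 'Z'],
--         '3': ['D', 'T'],
--         '4': ['L'],
--         '5': ['M', 'N'],
--         '6': ['R'],
--         '0': [''],
--     }
--     if not code:
--         return []
--     radices = [[code[0]]] + [reverse_mapping.get(d, ['']) for d in code[1:]]
--     total = 1
--     for letters in radices:
--         total *= len(letters)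
--     out = []
--     for k in range(min(100, total)):
--         idx = k
--         parts = []
--         for letters in reversed(radices):
--             idx, r = divmod(idx, len(letters))
--             parts.append(letters[r])
--         out.append(''.join(reversed(parts)))
--     return out
-- ===== Notes on version B (the rewrite author's own statement) =====
-- stated objective: alternative
-- what changed: B computes the total number of combinations arithmetically and produces only the first min(100, total) strings by mixed-radix decoding of each index, instead of materialising an up-to-1001-element capped product at every code position.
import Mathlib
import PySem

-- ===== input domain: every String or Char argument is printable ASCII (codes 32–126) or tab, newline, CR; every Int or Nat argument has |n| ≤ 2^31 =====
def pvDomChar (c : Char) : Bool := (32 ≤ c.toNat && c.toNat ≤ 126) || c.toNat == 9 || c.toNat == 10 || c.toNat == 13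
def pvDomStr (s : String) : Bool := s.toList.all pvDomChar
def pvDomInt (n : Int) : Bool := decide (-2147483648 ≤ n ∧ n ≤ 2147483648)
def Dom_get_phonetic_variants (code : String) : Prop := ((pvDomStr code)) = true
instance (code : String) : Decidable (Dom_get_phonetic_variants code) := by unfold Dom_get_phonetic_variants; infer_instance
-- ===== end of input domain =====

-- B produces only the first min(100, total) combinations by mixed-radix decoding of each index,
-- instead of materialising the capped (≤ 1001-element) product at every code position.

-- ===== PORT A =====
-- the literal `reverse_mapping` dict (appears verbatim in both Pythons)
def pvRevMap : PySem.Dict String (List String) :=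
  PySem.Dict.ofList
    [("1", ["B", "F", "P", "V"]),
     ("2", ["C", "G", "J", "K", "Q", "S", "X", "Z"]),
     ("3", ["D", "T"]),
     ("4", ["L"]),
     ("5", ["M", "N"]),
     ("6", ["R"]),
     ("0", [""])]

-- inner `for letter in letters` loop with its `break` once len(new_result) > 1000
def pvInnerA (pfx : String) (letters : List String) (acc : List String) : List String :=
  match letters with
  | [] => acc
  | l :: ls =>
    let acc' := acc ++ [pfx ++ l]
    if acc'.length > 1000 then acc' else pvInnerA pfx ls acc'

-- outer `for prefix in result` loop with its `break` (the Python re-tests len(new_result) > 1000)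
def pvOuterA (letters : List String) (result : List String) (acc : List String) : List String :=
  match result with
  | [] => acc
  | p :: ps =>
    let acc' := pvInnerA p letters acc
    if acc'.length > 1000 then acc' else pvOuterA letters ps acc'

def get_phonetic_variants (code : String) : List String :=
  match code.toList with
  | [] => []                                   -- `if not code or len(code) < 1: return []`
  | c :: rest =>
    let variants : List (List String) :=
      [String.ofList [c]] ::                   -- `[[code[0]]]` then one entry per digit of code[1:]
        rest.map (fun d =>
          match pvRevMap.get? (String.ofList [d]) with   -- `if digit in reverse_mapping: …[digit]`
          | some v => v
          | none => [""])
    (variants.foldl (fun res letters => pvOuterA letters res []) [""]).take 100  -- `result[:100]`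

-- ===== PORT B =====
-- decode combination #k: divmod over reversed(radices) collecting one letter each, then join reversed.
-- divmod is Nat division here, exact for Python since every index is ≥ 0 and every radix list B
-- builds is nonempty (so Python's divmod never sees a zero divisor and letters[r] never raises).
def pvDecodeB (radices : List (List String)) (k : Nat) : String :=
  let st := radices.reverse.foldl
    (fun (st : Nat × List String) letters =>
      (st.1 / letters.length, st.2 ++ [letters.getD (st.1 % letters.length) ""]))
    (k, ([] : List String))
  String.join st.2.reverse

def get_phonetic_variants_alt (code : String) : List String :=
  match code.toList with
  | [] => []
  | c :: rest =>
    let radices : List (List String) :=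
      [String.ofList [c]] :: rest.map (fun d => pvRevMap.getD (String.ofList [d]) [""])
    let total := radices.foldl (fun t letters => t * letters.length) 1
    (List.range (min 100 total)).map (fun k => pvDecodeB radices k)

-- ===== PRECONDITION & SPEC =====
def Spec_get_phonetic_variants (code : String) (out : List String) : Prop := out = get_phonetic_variants_alt code
instance (code : String) (out : List String) : Decidable (Spec_get_phonetic_variants code out) := by unfold Spec_get_phonetic_variants; infer_instance

-- ===== CLAIM (what is proved, stated in full; the proofs are below) =====
def Claim_equal_get_phonetic_variants : Prop := ∀ (code : String), Dom_get_phonetic_variants code → Spec_get_phonetic_variants code (get_phonetic_variants code)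

-- ===== LEMMAS AND PROOFS =====

-- the uncapped cartesian product that both programs approximate
def pvStep (res ls : List String) : List String := res.flatMap (fun p => ls.map (p ++ ·))
def pvProd (vs : List (List String)) : List String := vs.foldl pvStep [""]

lemma pvRevMap_getD_ne_nil (s : String) : pvRevMap.getD s [""] ≠ [] := by
  have h : pvRevMap = PySem.Dict.mk
    [("1", ["B", "F", "P", "V"]),
     ("2", ["C", "G", "J", "K", "Q", "S", "X", "Z"]),
     ("3", ["D", "T"]),
     ("4", ["L"]),
     ("5", ["M", "N"]),
     ("6", ["R"]),
     ("0", [""])] := by decide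
  rw [h, PySem.Dict.getD_eq_get?_getD]
  simp only [PySem.Dict.get?_mk_cons]
  split_ifs <;> simp [PySem.Dict.get?]

-- A's inner loop computes the first 1001 elements of acc ++ letters.map (pfx ++ ·)
lemma pvInnerA_eq (pfx : String) (letters : List String) :
    ∀ acc : List String, acc.length ≤ 1000 →
      pvInnerA pfx letters acc = (acc ++ letters.map (pfx ++ ·)).take 1001 := by
  induction letters with
  | nil => intro acc h; rw [pvInnerA]; simp; omega
  | cons l ls ih =>
    intro acc h
    rw [pvInnerA]
    by_cases hb : (acc ++ [pfx ++ l]).length > 1000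
    · rw [if_pos hb]
      have hlen : (acc ++ [pfx ++ l]).length = 1001 := by simp at hb ⊢; omega
      have : acc ++ (l :: ls).map (pfx ++ ·) = (acc ++ [pfx ++ l]) ++ ls.map (pfx ++ ·) := by simp
      rw [this, List.take_append_of_le_length (by omega), List.take_of_length_le (by omega)]
    · rw [if_neg hb]
      have : acc ++ (l :: ls).map (pfx ++ ·) = (acc ++ [pfx ++ l]) ++ ls.map (pfx ++ ·) := by simp
      rw [this, ih _ (by simp at hb ⊢; omega)]

-- A's outer loop computes the first 1001 elements of acc ++ pvStep ps letters
lemma pvOuterA_eq (letters : List String) :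
    ∀ (ps acc : List String), acc.length ≤ 1000 →
      pvOuterA letters ps acc = (acc ++ pvStep ps letters).take 1001 := by
  intro ps
  induction ps with
  | nil => intro acc h; rw [pvOuterA]; simp [pvStep]; omega
  | cons p ps ih =>
    intro acc h
    rw [pvOuterA]
    rw [pvInnerA_eq _ _ _ h]
    have hsplit : acc ++ pvStep (p :: ps) letters
        = (acc ++ letters.map (p ++ ·)) ++ pvStep ps letters := by
      simp [pvStep]
    by_cases hb : ((acc ++ letters.map (p ++ ·)).take 1001).length > 1000
    · rw [if_pos hb]
      have : (acc ++ letters.map (p ++ ·)).length ≥ 1001 := by simp at hb ⊢; omega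
      rw [hsplit]
      exact (List.take_append_of_le_length (by omega)).symm
    · rw [if_neg hb]
      have hle : (acc ++ letters.map (p ++ ·)).length ≤ 1000 := by simp at hb ⊢; omega
      rw [List.take_of_length_le (by omega), hsplit]
      exact ih _ hle

-- uniform-width flatMap length
lemma pvStep_length (res ls : List String) : (pvStep res ls).length = res.length * ls.length := by
  induction res with
  | nil => simp [pvStep]
  | cons p ps ih =>
    have h : pvStep (p :: ps) ls = ls.map (p ++ ·) ++ pvStep ps ls := by simp [pvStep]
    rw [h, List.length_append, List.length_map, ih, List.length_cons]; ring

-- truncating the prefix list to 1001 does not change the first 1001 products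
lemma pvStep_take (res ls : List String) (h : ls ≠ []) :
    (pvStep (res.take 1001) ls).take 1001 = (pvStep res ls).take 1001 := by
  by_cases hlen : res.length ≤ 1001
  · rw [List.take_of_length_le hlen]
  · have h1 : pvStep res ls = pvStep (res.take 1001) ls ++ pvStep (res.drop 1001) ls := by
      simp [pvStep, ← List.flatMap_append]
    have h2 : (pvStep (res.take 1001) ls).length = 1001 * ls.length := by
      rw [pvStep_length]; simp; omega
    have h3 : 0 < ls.length := List.length_pos_iff.mpr h
    rw [h1, List.take_append_of_le_length (by omega)]

-- A's capped fold agrees with the uncapped product on the first 1001 elements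
lemma pvFoldA_eq : ∀ (vs : List (List String)), (∀ ls ∈ vs, ls ≠ []) →
    ∀ res : List String,
      vs.foldl (fun r ls => pvOuterA ls r []) (res.take 1001) = (vs.foldl pvStep res).take 1001 := by
  intro vs
  induction vs with
  | nil => intro _ res; rfl
  | cons ls vss ih =>
    intro h res
    simp only [List.foldl_cons]
    rw [pvOuterA_eq ls (res.take 1001) [] (by simp)]
    simp only [List.nil_append]
    rw [pvStep_take res ls (h ls (by simp))]
    exact ih (fun l hl => h l (by simp [hl])) (pvStep res ls)

-- indexing a uniform-width flatMap
lemma pvStep_getElem? (res ls : List String) (hn : 0 < ls.length) (k : Nat) :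
    (pvStep res ls)[k]? = (res[k / ls.length]?).bind (fun p => (ls.map (p ++ ·))[k % ls.length]?) := by
  induction res generalizing k with
  | nil => simp [pvStep]
  | cons p ps ih =>
    have hstep : pvStep (p :: ps) ls = ls.map (p ++ ·) ++ pvStep ps ls := by simp [pvStep]
    by_cases hk : k < ls.length
    · rw [hstep, List.getElem?_append_left (by simpa using hk),
        Nat.div_eq_of_lt hk, Nat.mod_eq_of_lt hk]
      simp
    · rw [not_lt] at hk
      have hd : k / ls.length = (k - ls.length) / ls.length + 1 := by
        rw [Nat.div_eq_sub_div hn hk]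
      have hm : k % ls.length = (k - ls.length) % ls.length := Nat.mod_eq_sub_mod hk
      rw [hstep, List.getElem?_append_right (by simpa using hk), hd, hm]
      simpa using ih (k - ls.length)

lemma pvProd_length : ∀ vs : List (List String),
    (pvProd vs).length = vs.foldl (fun t ls => t * ls.length) 1 := by
  have gen : ∀ (vs : List (List String)) (res : List String),
      (vs.foldl pvStep res).length = vs.foldl (fun t ls => t * ls.length) res.length := by
    intro vs
    induction vs with
    | nil => intro res; rfl
    | cons ls vss ih => intro res; simp only [List.foldl_cons, ih, pvStep_length]
  intro vs
  simpa using gen vs [""]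

lemma pv_join_append (l : List String) (x : String) :
    String.join (l ++ [x]) = String.join l ++ x := by
  simp [String.join, List.foldl_append]

-- already-collected parts just prefix the parts collected by the rest of the decoding fold
lemma pvDecode_parts (l : List (List String)) :
    ∀ (q : Nat) (parts : List String),
      l.foldl (fun (st : Nat × List String) letters =>
          (st.1 / letters.length, st.2 ++ [letters.getD (st.1 % letters.length) ""])) (q, parts)
      = ((l.foldl (fun (st : Nat × List String) letters =>
          (st.1 / letters.length, st.2 ++ [letters.getD (st.1 % letters.length) ""])) (q, [])).1,
         parts ++ (l.foldl (fun (st : Nat × List String) letters =>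
          (st.1 / letters.length, st.2 ++ [letters.getD (st.1 % letters.length) ""])) (q, [])).2) := by
  induction l with
  | nil => intro q parts; simp
  | cons ls l ih =>
    intro q parts
    simp only [List.foldl_cons]
    rw [ih, ih (q / ls.length) ([] ++ [ls.getD (q % ls.length) ""])]
    simp

lemma pvDecodeB_snoc (vs : List (List String)) (ls : List String) (k : Nat) :
    pvDecodeB (vs ++ [ls]) k
      = pvDecodeB vs (k / ls.length) ++ ls.getD (k % ls.length) "" := by
  unfold pvDecodeB
  rw [List.reverse_append]
  simp only [List.reverse_singleton, List.singleton_append, List.foldl_cons, List.nil_append]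
  rw [pvDecode_parts]
  simp [pv_join_append]

-- the k-th element of the uncapped product is the mixed-radix decoding of k
lemma pvProd_getElem? : ∀ (vs : List (List String)), (∀ ls ∈ vs, ls ≠ []) →
    ∀ k : Nat, k < (pvProd vs).length → (pvProd vs)[k]? = some (pvDecodeB vs k) := by
  intro vs
  induction vs using List.reverseRecOn with
  | nil =>
    intro _ k hk
    simp [pvProd] at hk
    subst hk
    rfl
  | append_singleton vs ls ih =>
    intro hne k hk
    have hls : ls ≠ [] := hne ls (by simp)
    have hn : 0 < ls.length := List.length_pos_iff.mpr hls
    have hsnoc : pvProd (vs ++ [ls]) = pvStep (pvProd vs) ls := by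
      simp [pvProd, List.foldl_append]
    rw [hsnoc] at hk ⊢
    rw [pvStep_getElem? _ _ hn]
    have hklen : k / ls.length < (pvProd vs).length := by
      rw [pvStep_length] at hk
      exact (Nat.div_lt_iff_lt_mul hn).mpr hk
    rw [ih (fun l hl => hne l (by simp [hl])) _ hklen, pvDecodeB_snoc]
    have hm : k % ls.length < ls.length := Nat.mod_lt _ hn
    simp [List.getElem?_map, List.getElem?_eq_getElem hm]

-- the first 100 elements of the product are exactly B's decoded range
lemma pvProd_take (vs : List (List String)) (h : ∀ ls ∈ vs, ls ≠ []) :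
    (pvProd vs).take 100
      = (List.range (min 100 (vs.foldl (fun t ls => t * ls.length) 1))).map
          (fun k => pvDecodeB vs k) := by
  have hlen := pvProd_length vs
  apply List.ext_getElem?
  intro i
  by_cases hi : i < min 100 (pvProd vs).length
  · rw [List.getElem?_take_of_lt (by omega),
      List.getElem?_map, List.getElem?_range (by omega)]
    rw [pvProd_getElem? vs h i (by omega)]
    rfl
  · have h1 : (List.take 100 (pvProd vs)).length ≤ i := by simp; omega
    have h2 : ((List.range (min 100 (vs.foldl (fun t ls => t * ls.length) 1))).map
        (fun k => pvDecodeB vs k)).length ≤ i := by simp; omega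
    rw [List.getElem?_eq_none h1, List.getElem?_eq_none h2]

-- ===== VERDICT (by name: the statement is the Claim_ definition above) =====
theorem get_phonetic_variants_spec : Claim_equal_get_phonetic_variants := by
  intro code _
  unfold Spec_get_phonetic_variants get_phonetic_variants get_phonetic_variants_alt
  cases hc : code.toList with
  | nil => rfl
  | cons c rest =>
    simp only
    have hvar : (rest.map (fun d =>
        match pvRevMap.get? (String.ofList [d]) with
        | some v => v
        | none => [""]))
        = rest.map (fun d => pvRevMap.getD (String.ofList [d]) [""]) := by
      refine List.map_congr_left (fun d _ => ?_)
      rw [PySem.Dict.getD_eq_get?_getD]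
      cases pvRevMap.get? (String.ofList [d]) <;> rfl
    rw [hvar]
    set vs : List (List String) :=
      [String.ofList [c]] :: rest.map (fun d => pvRevMap.getD (String.ofList [d]) [""]) with hvs
    have hne : ∀ ls ∈ vs, ls ≠ [] := by
      intro ls hls
      rw [hvs, List.mem_cons] at hls
      rcases hls with h | h
      · subst h; simp
      · obtain ⟨d, _, rfl⟩ := List.mem_map.mp h
        exact pvRevMap_getD_ne_nil _
    have hF := pvFoldA_eq vs hne [""]
    rw [show ([""] : List String).take 1001 = [""] from rfl] at hF
    calc (vs.foldl (fun res letters => pvOuterA letters res []) [""]).take 100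
        = ((vs.foldl pvStep [""]).take 1001).take 100 := by rw [hF]
      _ = (pvProd vs).take 100 := by rw [List.take_take]; rfl
      _ = (List.range (min 100 (vs.foldl (fun t letters => t * letters.length) 1))).map
            (fun k => pvDecodeB vs k) := pvProd_take vs hne
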